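-- pv_equiv track=rewrite | github.com/AmirrezaFarnamTaheri/MassConfigMerger | src/massconfigmerger/vpn_merger.py | categorize_protocol
-- ===== SOURCE A (Python) =====
-- def categorize_protocol(config: str) -> str:
--     """Categorize configuration by protocol."""
--     protocol_map = {
--         "vmess://": "VMess",
--         "vless://": "VLESS",
--         "ss://": "Shadowsocks",
--         "ssr://": "ShadowsocksR",
--         "trojan://": "Trojan",
--         "hy2://": "Hysteria2",
--         "hysteria2://": "Hysteria2",
--         "hysteria://": "Hysteria",
--         "tuic://": "TUIC",
--         "reality://": "Reality",
--         "naive://": "Naive",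
--         "juicity://": "Juicity",
--         "wireguard://": "WireGuard",
--         "shadowtls://": "ShadowTLS",
--         "brook://": "Brook",
--     }
--
--     for prefix, protocol in protocol_map.items():
--         if config.startswith(prefix):
--             return protocol
--
--     return "Other"
-- ===== SOURCE B (Python) =====
-- PROTOCOL_MAP = {
--     "vmess": "VMess",
--     "vless": "VLESS",
--     "ss": "Shadowsocks",
--     "ssr": "ShadowsocksR",
--     "trojan": "Trojan",
--     "hy2": "Hysteria2",
--     "hysteria2": "Hysteria2",
--     "hysteria": "Hysteria",
--     "tuic": "TUIC",
--     "reality": "Reality",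
--     "naive": "Naive",
--     "juicity": "Juicity",
--     "wireguard": "WireGuard",
--     "shadowtls": "ShadowTLS",
--     "brook": "Brook",
-- }
--
--
-- def categorize_protocol(config: str) -> str:
--     """Categorize configuration by protocol."""
--     head, sep, _tail = config.partition("://")
--     if sep:
--         return PROTOCOL_MAP.get(head, "Other")
--     return "Other"
-- ===== Notes on version B (the rewrite author's own statement) =====
-- stated objective: simpler
-- what changed: B parses the scheme once with str.partition at the first separator and does a single dict lookup on the bare scheme name, instead of A's loop testing fifteen startswith prefixes in order.
import Mathlib
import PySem

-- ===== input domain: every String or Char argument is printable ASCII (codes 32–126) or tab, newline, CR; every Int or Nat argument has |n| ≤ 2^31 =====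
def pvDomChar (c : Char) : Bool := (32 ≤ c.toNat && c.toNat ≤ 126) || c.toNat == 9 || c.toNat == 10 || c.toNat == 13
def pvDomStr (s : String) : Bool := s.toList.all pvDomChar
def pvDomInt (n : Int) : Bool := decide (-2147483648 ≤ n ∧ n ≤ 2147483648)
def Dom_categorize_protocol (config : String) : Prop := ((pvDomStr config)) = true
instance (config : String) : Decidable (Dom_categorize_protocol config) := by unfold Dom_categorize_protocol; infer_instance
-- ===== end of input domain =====

set_option maxRecDepth 4000
set_option maxHeartbeats 1000000


-- B replaces A's ordered scan of fifteen startswith prefixes by one partition at the first "://" plus a dict lookup on the bare scheme name (objective: simpler).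

-- ===== PORT A =====
-- the dict literal of A, iterated in insertion order by the for-loop
def pvItemsA : List (String × String) :=
  [("vmess://", "VMess"), ("vless://", "VLESS"), ("ss://", "Shadowsocks"),
   ("ssr://", "ShadowsocksR"), ("trojan://", "Trojan"), ("hy2://", "Hysteria2"),
   ("hysteria2://", "Hysteria2"), ("hysteria://", "Hysteria"), ("tuic://", "TUIC"),
   ("reality://", "Reality"), ("naive://", "Naive"), ("juicity://", "Juicity"),
   ("wireguard://", "WireGuard"), ("shadowtls://", "ShadowTLS"), ("brook://", "Brook")]

-- the for-loop with early return: first item whose prefix matches, else "Other"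
def pvLoopA : List (String × String) → String → String
  | [], _ => "Other"
  | (prefix_, protocol) :: rest, config =>
      if PySem.Str.startswith config prefix_ then protocol else pvLoopA rest config

def categorize_protocol (config : String) : String :=
  pvLoopA pvItemsA config

-- ===== PORT B =====
-- hand port of str.partition("://") (PySem has no partition): scan for the FIRST
-- occurrence of "://", returning the characters before it (none if absent); exact.
def pvPartHead : List Char → Option (List Char)
  | [] => none
  | c :: rest =>
      if [':', '/', '/'] <+: (c :: rest) then some []
      else (pvPartHead rest).map (c :: ·)

def pvProtoMapB : PySem.Dict String String :=
  PySem.Dict.mk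
    [("vmess", "VMess"), ("vless", "VLESS"), ("ss", "Shadowsocks"),
     ("ssr", "ShadowsocksR"), ("trojan", "Trojan"), ("hy2", "Hysteria2"),
     ("hysteria2", "Hysteria2"), ("hysteria", "Hysteria"), ("tuic", "TUIC"),
     ("reality", "Reality"), ("naive", "Naive"), ("juicity", "Juicity"),
     ("wireguard", "WireGuard"), ("shadowtls", "ShadowTLS"), ("brook", "Brook")]

def categorize_protocol_alt (config : String) : String :=
  match pvPartHead config.toList with
  | some head => pvProtoMapB.getD (String.ofList head) "Other"
  | none => "Other"

-- ===== PRECONDITION & SPEC =====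
def Spec_categorize_protocol (config : String) (out : String) : Prop := out = categorize_protocol_alt config
instance (config : String) (out : String) : Decidable (Spec_categorize_protocol config out) := by unfold Spec_categorize_protocol; infer_instance

-- ===== CLAIM (what is proved, stated in full; the proofs are below) =====
def Claim_equal_categorize_protocol : Prop := ∀ (config : String), Dom_categorize_protocol config → Spec_categorize_protocol config (categorize_protocol config)

-- ===== LEMMAS AND PROOFS =====

-- if pvPartHead finds nothing, "://" occurs nowhere in l
theorem pvPartHead_none {l : List Char} (h : pvPartHead l = none) :
    ¬ ([':', '/', '/'] <:+: l) := by
  induction l with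
  | nil => simp
  | cons c rest ih =>
      rw [pvPartHead] at h
      split at h
      · simp at h
      · rename_i hnp
        simp only [Option.map_eq_none_iff] at h
        rw [List.infix_cons_iff]
        rintro (hp | hi)
        · exact hnp hp
        · exact ih h hi

-- if pvPartHead finds head, l decomposes as head ++ "://" ++ rest
theorem pvPartHead_some {l h : List Char} (hh : pvPartHead l = some h) :
    ∃ r : List Char, l = h ++ [':', '/', '/'] ++ r := by
  induction l generalizing h with
  | nil => simp [pvPartHead] at hh
  | cons c rest ih =>
      rw [pvPartHead] at hh
      split at hh
      · rename_i hp
        obtain ⟨r, hr⟩ := hp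
        cases hh
        exact ⟨r, by simpa using hr.symm⟩
      · simp only [Option.map_eq_some_iff] at hh
        obtain ⟨h', hh', rfl⟩ := hh
        obtain ⟨r, hr⟩ := ih hh'
        exact ⟨r, by simp [hr]⟩

-- a scheme containing no ':' followed by "://" is found exactly there
theorem pvPartHead_of_prefix {s l : List Char} (hc : ':' ∉ s)
    (hp : (s ++ [':', '/', '/']) <+: l) : pvPartHead l = some s := by
  induction s generalizing l with
  | nil =>
      obtain ⟨r, hr⟩ := hp
      subst hr
      simp [pvPartHead]
  | cons c s' ih =>
      obtain ⟨r, hr⟩ := hp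
      subst hr
      have hc' : c ≠ ':' := fun he => hc (by simp [he])
      have hnp : ¬ ([':', '/', '/'] <+: (c :: (s' ++ [':', '/', '/'] ++ r))) := by
        rintro ⟨t, ht⟩
        exact hc' (by simpa using (congrArg List.head? ht).symm)
      have ihp : pvPartHead (s' ++ [':', '/', '/'] ++ r) = some s' :=
        ih (fun he => hc (by simp [he])) ⟨r, by simp⟩
      rw [show ((c :: s') ++ [':', '/', '/'] ++ r : List Char)
            = c :: (s' ++ [':', '/', '/'] ++ r) by simp]
      rw [pvPartHead, if_neg hnp, ihp]
      rfl

-- startswith scheme++"://"  ⟺  the parsed head equals the scheme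
theorem pvStartIff (config : String) (hd : List Char)
    (hh : pvPartHead config.toList = some hd) (p : String) (s : List Char)
    (hp : p.toList = s ++ [':', '/', '/']) (hc : ':' ∉ s) :
    (PySem.Str.startswith config p = true) ↔ hd = s := by
  rw [show PySem.Str.startswith config p = PySem.Chars.startswith config.toList p.toList by simp,
      PySem.Chars.startswith_iff, hp]
  constructor
  · intro hpre
    have := pvPartHead_of_prefix hc hpre
    rw [hh] at this
    exact Option.some_inj.mp this.symm |>.symm
  · rintro rfl
    obtain ⟨r, hr⟩ := pvPartHead_some hh
    exact ⟨r, by simp [hr]⟩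

theorem pvStart (config : String) (hd : List Char)
    (hh : pvPartHead config.toList = some hd) (p : String) (s : List Char)
    (hp : p.toList = s ++ [':', '/', '/']) (hc : ':' ∉ s) :
    PySem.Str.startswith config p = (hd == s) := by
  rcases hb : (hd == s) with _ | _
  · rw [Bool.eq_false_iff]
    intro ht
    rw [(pvStartIff config hd hh p s hp hc)] at ht
    simp [ht] at hb
  · rw [beq_iff_eq] at hb
    exact (pvStartIff config hd hh p s hp hc).mpr hb

theorem pvBeq (s : String) (l : List Char) :
    (s == String.ofList l) = (l == s.toList) := by
  rcases h : (l == s.toList) with _ | _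
  · rw [beq_eq_false_iff_ne] at h
    simp only [beq_eq_false_iff_ne]
    intro he
    exact h (by rw [he]; simp)
  · rw [beq_iff_eq] at h
    subst h
    simp

-- one layer of the if-chain vs the option lookup chain
theorem pvGetD_if (b : Bool) (x d r : String) (o : Option String) (h : r = o.getD d) :
    (if b then x else r) = (if b then some x else o).getD d := by
  cases b <;> simp [h]

-- the for-loop returns "Other" when no prefix matches
theorem pvLoopA_other (config : String) (items : List (String × String))
    (h : ∀ p ∈ items, PySem.Str.startswith config p.1 = false) :
    pvLoopA items config = "Other" := by
  induction items with
  | nil => rfl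
  | cons a rest ih =>
      obtain ⟨pre, proto⟩ := a
      have h0 : PySem.Str.startswith config pre = false :=
        h (pre, proto) List.mem_cons_self
      simp only [pvLoopA, h0, Bool.false_eq_true, if_false]
      exact ih fun p hp => h p (List.mem_cons_of_mem _ hp)

-- ===== VERDICT (by name: the statement is the Claim_ definition above) =====
theorem categorize_protocol_spec : Claim_equal_categorize_protocol := by
  intro config _
  unfold Spec_categorize_protocol categorize_protocol categorize_protocol_alt
  cases hh : pvPartHead config.toList with
  | none =>
      have hno : ∀ p ∈ pvItemsA, PySem.Str.startswith config p.1 = false := by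
        intro p hp
        rw [Bool.eq_false_iff]
        intro hs
        rw [show PySem.Str.startswith config p.1
              = PySem.Chars.startswith config.toList p.1.toList by simp,
            PySem.Chars.startswith_iff] at hs
        fin_cases hp <;>
          exact pvPartHead_none hh (List.IsInfix.trans (by decide) hs.isInfix)
      rw [pvLoopA_other config pvItemsA hno]
  | some hd =>
      have st1 := pvStart config hd hh "vmess://" "vmess".toList (by decide) (by decide)
      have st2 := pvStart config hd hh "vless://" "vless".toList (by decide) (by decide)
      have st3 := pvStart config hd hh "ss://" "ss".toList (by decide) (by decide)
      have st4 := pvStart config hd hh "ssr://" "ssr".toList (by decide) (by decide)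
      have st5 := pvStart config hd hh "trojan://" "trojan".toList (by decide) (by decide)
      have st6 := pvStart config hd hh "hy2://" "hy2".toList (by decide) (by decide)
      have st7 := pvStart config hd hh "hysteria2://" "hysteria2".toList (by decide) (by decide)
      have st8 := pvStart config hd hh "hysteria://" "hysteria".toList (by decide) (by decide)
      have st9 := pvStart config hd hh "tuic://" "tuic".toList (by decide) (by decide)
      have st10 := pvStart config hd hh "reality://" "reality".toList (by decide) (by decide)
      have st11 := pvStart config hd hh "naive://" "naive".toList (by decide) (by decide)
      have st12 := pvStart config hd hh "juicity://" "juicity".toList (by decide) (by decide)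
      have st13 := pvStart config hd hh "wireguard://" "wireguard".toList (by decide) (by decide)
      have st14 := pvStart config hd hh "shadowtls://" "shadowtls".toList (by decide) (by decide)
      have st15 := pvStart config hd hh "brook://" "brook".toList (by decide) (by decide)
      simp only [pvItemsA, pvLoopA, st1, st2, st3, st4, st5, st6, st7, st8, st9, st10,
        st11, st12, st13, st14, st15, pvProtoMapB, PySem.Dict.getD,
        PySem.Dict.get?_mk_cons, pvBeq]
      apply pvGetD_if; apply pvGetD_if; apply pvGetD_if; apply pvGetD_if
      apply pvGetD_if; apply pvGetD_if; apply pvGetD_if; apply pvGetD_if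
      apply pvGetD_if; apply pvGetD_if; apply pvGetD_if; apply pvGetD_if
      apply pvGetD_if; apply pvGetD_if; apply pvGetD_if
      rfl
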